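-- pv_equiv track=rewrite | github.com/kseniia-pug/BNNtoSAT | src/encodeModel/encode_constraint.py | encode_leq
-- ===== SOURCE A (Python) =====
-- from typing import List
--
-- def encode_leq(
--         x: List[int],
--         b: List[bool],
-- ) -> List[List[int]]:
--     assert len(x) == len(b)
--
--     if len(x) == 0:
--         return []
--
--     clauses = []
--     assert isinstance(b[0], bool)
--     if not b[0]:
--         clauses.append([-x[0]])
--         clauses.extend(encode_leq(x[1:], b[1:]))
--     else:
--         # Append (x=0) to all sub-clauses:
--         for clause in encode_leq(x[1:], b[1:]):
--             clauses.append([-x[0]] + clause)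
--     return clauses
-- ===== SOURCE B (Python) =====
-- from typing import List
--
-- def encode_leq(
--         x: List[int],
--         b: List[bool],
-- ) -> List[List[int]]:
--     assert len(x) == len(b)
--     clauses = []
--     prefix = []  # negated literals of the true bits seen so far
--     for xi, bi in zip(x, b):
--         if bi:
--             prefix.append(-xi)
--         else:
--             clauses.append(prefix + [-xi])
--     return clauses
-- ===== Notes on version B (the rewrite author's own statement) =====
-- stated objective: faster
-- what changed: Replaced the O(n^2) recursion with per-level list slicing and re-prefixing of all sub-clauses by a single left-to-right pass that maintains the running prefix of negated true-bit literals and emits one clause per false bit.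
import Mathlib
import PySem

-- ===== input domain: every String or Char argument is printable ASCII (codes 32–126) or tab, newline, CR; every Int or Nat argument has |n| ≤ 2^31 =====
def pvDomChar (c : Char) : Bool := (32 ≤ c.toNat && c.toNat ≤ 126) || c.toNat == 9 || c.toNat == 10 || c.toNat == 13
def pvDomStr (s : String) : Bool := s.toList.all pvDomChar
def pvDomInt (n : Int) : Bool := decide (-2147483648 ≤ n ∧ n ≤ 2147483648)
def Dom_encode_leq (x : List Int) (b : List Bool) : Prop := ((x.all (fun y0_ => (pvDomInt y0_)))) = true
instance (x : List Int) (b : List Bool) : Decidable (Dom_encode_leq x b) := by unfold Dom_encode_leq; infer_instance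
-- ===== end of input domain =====

-- B replaces A's recursion-with-slicing-and-reprefixing by one pass keeping the running prefix of
-- negated true-bit literals (faster in a timing run: no per-level slicing/re-prefixing).


-- ===== PORT A =====
-- A recurses on the tails x[1:], b[1:]: a false bit emits [-x0] and keeps the sub-clauses;
-- a true bit prepends -x0 to every sub-clause.
def encode_leq (x : List Int) (b : List Bool) : List (List Int) :=
  match x, b with
  | [], _ => []
  | x0 :: xs, b0 :: bs =>
    if !b0 then [-x0] :: encode_leq xs bs
    else (encode_leq xs bs).map (fun clause => -x0 :: clause)
  | _ :: _, [] => []   -- unreachable under Pre_ (Python's assert raises here)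

-- ===== PORT B =====
-- single pass over zip x b, state = (prefix of negated true-bit literals, clauses so far)
def encode_leq_alt (x : List Int) (b : List Bool) : List (List Int) :=
  ((x.zip b).foldl
    (fun (st : List Int × List (List Int)) p =>
      if p.2 then (st.1 ++ [-p.1], st.2)
      else (st.1, st.2 ++ [st.1 ++ [-p.1]]))
    ([], [])).2

-- ===== PRECONDITION & SPEC =====
-- Pre_ excludes exactly the inputs where Python's `assert len(x) == len(b)` raises AssertionError.
def Pre_encode_leq (x : List Int) (b : List Bool) : Prop := x.length = b.length
instance (x : List Int) (b : List Bool) : Decidable (Pre_encode_leq x b) := by unfold Pre_encode_leq; infer_instance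
def pvWitness_encode_leq : List Int × List Bool := ([3, -5, 7], [true, false, true])
def Spec_encode_leq (x : List Int) (b : List Bool) (out : List (List Int)) : Prop := out = encode_leq_alt x b
instance (x : List Int) (b : List Bool) (out : List (List Int)) : Decidable (Spec_encode_leq x b out) := by unfold Spec_encode_leq; infer_instance

-- ===== CLAIM (what is proved, stated in full; the proofs are below) =====
def Claim_equal_encode_leq : Prop := ∀ (x : List Int) (b : List Bool), Dom_encode_leq x b → Pre_encode_leq x b → Spec_encode_leq x b (encode_leq x b)

-- ===== LEMMAS AND PROOFS =====

-- Loop invariant for B's fold: the final clause list is the accumulator followed by A's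
-- recursive result with the current prefix prepended to each clause.
theorem encode_leq_fold_inv (x : List Int) (b : List Bool) (h : x.length = b.length)
    (prefix_ : List Int) (acc : List (List Int)) :
    ((x.zip b).foldl
      (fun (st : List Int × List (List Int)) p =>
        if p.2 then (st.1 ++ [-p.1], st.2)
        else (st.1, st.2 ++ [st.1 ++ [-p.1]]))
      (prefix_, acc)).2
    = acc ++ (encode_leq x b).map (fun c => prefix_ ++ c) := by
  induction x generalizing b prefix_ acc with
  | nil => cases b with
    | nil => simp [encode_leq]
    | cons b0 bs => simp at h
  | cons x0 xs ih =>
    cases b with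
    | nil => simp at h
    | cons b0 bs =>
      simp only [List.length_cons, Nat.add_right_cancel_iff] at h
      cases b0 with
      | false =>
        simp only [List.zip_cons_cons, List.foldl_cons]
        rw [ih bs h]
        simp [encode_leq]
      | true =>
        simp only [List.zip_cons_cons, List.foldl_cons, reduceIte]
        rw [ih bs h]
        simp [encode_leq, List.map_map, Function.comp]

-- ===== VERDICT (by name: the statement is the Claim_ definition above) =====
theorem encode_leq_spec : Claim_equal_encode_leq := by
  intro x b _ hpre
  unfold Spec_encode_leq encode_leq_alt
  rw [encode_leq_fold_inv x b hpre [] []]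
  simp
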